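-- pv_equiv track=rewrite | github.com/james0032/graphembed | filter_nodes.py | check_accepted
-- ===== SOURCE A (Python) =====
-- def check_accepted(edge, typemap, accepted):
--     subj = edge["subject"]
--     obj = edge["object"]
--     subj_types = typemap.get(subj, set())
--     obj_types = typemap.get(obj, set())
--     for acc in accepted:
--         if acc[0] in subj_types and acc[1] in obj_types:
--             return False
--         if acc[1] in subj_types and acc[0] in obj_types:
--             return False
--     return True
-- ===== SOURCE B (Python) =====
-- def check_accepted(edge, typemap, accepted):
--     subj_types = typemap.get(edge["subject"], set())
--     obj_types = typemap.get(edge["object"], set())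
--     forbidden = set()
--     for acc in accepted:
--         forbidden.add((acc[0], acc[1]))
--         forbidden.add((acc[1], acc[0]))
--     return not any((s, o) in forbidden for s in subj_types for o in obj_types)
-- ===== Notes on version B (the rewrite author's own statement) =====
-- stated objective: alternative
-- what changed: B precomputes a symmetric 'forbidden' set of type pairs from accepted once, then scans the product of the edge's subject and object type sets testing membership, instead of A's loop over accepted with four membership tests per entry.
import Mathlib
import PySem

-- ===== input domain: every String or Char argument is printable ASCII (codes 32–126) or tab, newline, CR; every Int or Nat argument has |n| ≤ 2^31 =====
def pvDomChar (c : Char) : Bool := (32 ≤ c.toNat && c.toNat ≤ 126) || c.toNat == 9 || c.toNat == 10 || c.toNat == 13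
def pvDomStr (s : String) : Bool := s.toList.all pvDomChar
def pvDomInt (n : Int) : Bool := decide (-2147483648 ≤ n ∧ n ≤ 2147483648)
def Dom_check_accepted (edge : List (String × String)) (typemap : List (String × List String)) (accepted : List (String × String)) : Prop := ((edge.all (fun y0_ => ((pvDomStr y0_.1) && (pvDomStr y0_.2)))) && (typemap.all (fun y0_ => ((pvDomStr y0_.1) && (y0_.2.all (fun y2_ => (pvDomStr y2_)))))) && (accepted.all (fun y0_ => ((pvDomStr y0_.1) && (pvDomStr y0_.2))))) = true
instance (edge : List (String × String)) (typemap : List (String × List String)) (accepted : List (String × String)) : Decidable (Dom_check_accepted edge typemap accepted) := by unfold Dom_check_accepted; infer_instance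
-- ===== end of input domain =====

-- B builds a symmetric forbidden set from `accepted` once and scans the product of the
-- two type sets, instead of A's scan over `accepted`; alternative decomposition, same result.

-- ===== PORT A =====
-- first-match association lookup (Python d[k] / d.get)
def assocGetA {α : Type} (d : List (String × α)) (k : String) : Option α :=
  (d.find? (fun p => p.1 == k)).map (·.2)

-- A's for-loop over accepted with early return False
def checkALoop (S O : List String) : List (String × String) → Bool
  | [] => true
  | acc :: rest =>
    if S.contains acc.1 && O.contains acc.2 then false
    else if S.contains acc.2 && O.contains acc.1 then false
    else checkALoop S O rest

def check_accepted (edge : List (String × String)) (typemap : List (String × List String)) (accepted : List (String × String)) : Bool :=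
  match assocGetA edge "subject", assocGetA edge "object" with
  | some subj, some obj =>
      let S := (assocGetA typemap subj).getD []
      let O := (assocGetA typemap obj).getD []
      checkALoop S O accepted
  | _, _ => true  -- unreachable under Pre_ (Python raises KeyError)

-- ===== PORT B =====
-- first-match association lookup (Python d[k] / d.get)
def assocGetB {α : Type} (d : List (String × α)) (k : String) : Option α :=
  (d.find? (fun p => p.1 == k)).map (·.2)

def check_accepted_alt (edge : List (String × String)) (typemap : List (String × List String)) (accepted : List (String × String)) : Bool :=
  match assocGetB edge "subject" with
  | none => true  -- unreachable under Pre_ (Python raises KeyError)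
  | some subj =>
    match assocGetB edge "object" with
    | none => true  -- unreachable under Pre_ (Python raises KeyError)
    | some obj =>
      let S := (assocGetB typemap subj).getD []
      let O := (assocGetB typemap obj).getD []
      let forbidden : PySem.Set (String × String) :=
        accepted.foldl (fun f acc => PySem.Set.add (PySem.Set.add f (acc.1, acc.2)) (acc.2, acc.1)) PySem.Set.empty
      !(S.any fun s => O.any fun o => PySem.Set.contains forbidden (s, o))

-- ===== PRECONDITION & SPEC =====
-- Pre_ excludes exactly the edges missing a "subject" or "object" key, where Python A raises KeyError
def Pre_check_accepted (edge : List (String × String)) (typemap : List (String × List String)) (accepted : List (String × String)) : Prop :=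
  "subject" ∈ edge.map Prod.fst ∧ "object" ∈ edge.map Prod.fst
instance (edge : List (String × String)) (typemap : List (String × List String)) (accepted : List (String × String)) : Decidable (Pre_check_accepted edge typemap accepted) := by unfold Pre_check_accepted; infer_instance

def pvWitness_check_accepted : (List (String × String)) × (List (String × List String)) × (List (String × String)) :=
  ([("subject", "a"), ("object", "b")], [("a", ["X"]), ("b", ["Y"])], [("X", "Y")])

def Spec_check_accepted (edge : List (String × String)) (typemap : List (String × List String)) (accepted : List (String × String)) (out : Bool) : Prop := out = check_accepted_alt edge typemap accepted
instance (edge : List (String × String)) (typemap : List (String × List String)) (accepted : List (String × String)) (out : Bool) : Decidable (Spec_check_accepted edge typemap accepted out) := by unfold Spec_check_accepted; infer_instance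

-- ===== CLAIM (what is proved, stated in full; the proofs are below) =====
def Claim_equal_check_accepted : Prop := ∀ (edge : List (String × String)) (typemap : List (String × List String)) (accepted : List (String × String)), Dom_check_accepted edge typemap accepted → Pre_check_accepted edge typemap accepted → Spec_check_accepted edge typemap accepted (check_accepted edge typemap accepted)

-- ===== LEMMAS AND PROOFS =====

theorem mem_foldl_forbidden (accepted : List (String × String)) (f : PySem.Set (String × String)) (p : String × String) :
    p ∈ accepted.foldl (fun f acc => PySem.Set.add (PySem.Set.add f (acc.1, acc.2)) (acc.2, acc.1)) f ↔
      p ∈ f ∨ ∃ a ∈ accepted, p = (a.1, a.2) ∨ p = (a.2, a.1) := by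
  induction accepted generalizing f with
  | nil => simp
  | cons a rest ih =>
    simp only [List.foldl_cons, ih, PySem.Set.mem_add, List.mem_cons]
    constructor
    · rintro (((h | h) | h) | ⟨b, hb, h⟩)
      · exact Or.inl h
      · exact Or.inr ⟨a, Or.inl rfl, Or.inl h⟩
      · exact Or.inr ⟨a, Or.inl rfl, Or.inr h⟩
      · exact Or.inr ⟨b, Or.inr hb, h⟩
    · rintro (h | ⟨b, (rfl | hb), h⟩)
      · exact Or.inl (Or.inl (Or.inl h))
      · rcases h with h | h
        · exact Or.inl (Or.inl (Or.inr h))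
        · exact Or.inl (Or.inr h)
      · exact Or.inr ⟨b, hb, h⟩

theorem checkALoop_eq_true_iff (S O : List String) (accepted : List (String × String)) :
    checkALoop S O accepted = true ↔
      ∀ a ∈ accepted, ¬(a.1 ∈ S ∧ a.2 ∈ O) ∧ ¬(a.2 ∈ S ∧ a.1 ∈ O) := by
  induction accepted with
  | nil => simp [checkALoop]
  | cons a rest ih =>
    cases h1 : (S.contains a.1 && O.contains a.2) with
    | true =>
      simp only [List.contains_eq_mem, Bool.and_eq_true, decide_eq_true_eq] at h1
      simp [checkALoop, List.contains_eq_mem, h1.1, h1.2]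
    | false =>
      cases h2 : (S.contains a.2 && O.contains a.1) with
      | true =>
        simp only [List.contains_eq_mem, Bool.and_eq_true, decide_eq_true_eq] at h2
        simp [checkALoop, List.contains_eq_mem, h2.1, h2.2, ite_self]
      | false =>
        simp only [List.contains_eq_mem, Bool.and_eq_false_iff, decide_eq_false_iff_not] at h1 h2
        simp only [checkALoop, List.contains_eq_mem, List.mem_cons]
        have e1 : ¬(a.1 ∈ S ∧ a.2 ∈ O) := by tauto
        have e2 : ¬(a.2 ∈ S ∧ a.1 ∈ O) := by tauto
        have eb1 : (decide (a.1 ∈ S) && decide (a.2 ∈ O)) = false := by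
          rcases h1 with h | h <;> simp [h]
        have eb2 : (decide (a.2 ∈ S) && decide (a.1 ∈ O)) = false := by
          rcases h2 with h | h <;> simp [h]
        rw [eb1, eb2]
        simp only [Bool.false_eq_true, if_false, ih]
        constructor
        · rintro h b (rfl | hb)
          · exact ⟨e1, e2⟩
          · exact h b hb
        · intro h b hb; exact h b (Or.inr hb)

theorem core_eq (S O : List String) (accepted : List (String × String)) :
    checkALoop S O accepted =
      !(S.any fun s => O.any fun o =>
        PySem.Set.contains
          (accepted.foldl (fun f acc => PySem.Set.add (PySem.Set.add f (acc.1, acc.2)) (acc.2, acc.1)) PySem.Set.empty)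
          (s, o)) := by
  rw [Bool.eq_iff_iff, checkALoop_eq_true_iff]
  simp only [Bool.not_eq_true', List.any_eq_false, List.any_eq_true,
    PySem.Set.contains_iff, mem_foldl_forbidden, PySem.Set.empty, List.not_mem_nil, false_or]
  constructor
  · intro h s hs
    rintro ⟨o, ho, a, ha, hp | hp⟩
    · injection hp with e1 e2; subst e1; subst e2
      exact (h a ha).1 ⟨hs, ho⟩
    · injection hp with e1 e2; subst e1; subst e2
      exact (h a ha).2 ⟨hs, ho⟩
  · intro h a ha
    constructor
    · rintro ⟨hs, ho⟩
      exact (h a.1 hs) ⟨a.2, ho, a, ha, Or.inl rfl⟩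
    · rintro ⟨hs, ho⟩
      exact (h a.2 hs) ⟨a.1, ho, a, ha, Or.inr rfl⟩

-- ===== VERDICT (by name: the statement is the Claim_ definition above) =====
theorem check_accepted_spec : Claim_equal_check_accepted := by
  intro edge typemap accepted _ _
  unfold Spec_check_accepted check_accepted check_accepted_alt
  unfold assocGetA assocGetB
  cases (edge.find? (fun p => p.1 == "subject")).map (·.2) <;>
    cases (edge.find? (fun p => p.1 == "object")).map (·.2) <;> simp [core_eq]
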